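-- pv_equiv track=rewrite | github.com/Anadz2/Ia | src/project_manager.py | _generate_simple_structure
-- ===== SOURCE A (Python) =====
-- from typing import Dict, List, Optional, Tuple
--
-- def _generate_simple_structure(files: Dict[str, str]) -> str:
--     """Generate simple project structure from files dict"""
--     structure_lines = []
--
--     # Group files by directory
--     dirs = {}
--     for filename in sorted(files.keys()):
--         parts = filename.split('/')
--         if len(parts) > 1:
--             dir_name = '/'.join(parts[:-1])
--             if dir_name not in dirs:
--                 dirs[dir_name] = []
--             dirs[dir_name].append(parts[-1])
--         else:
--             if '.' not in dirs:
--                 dirs['.'] = []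
--             dirs['.'].append(filename)
--
--     # Build structure
--     for dir_name in sorted(dirs.keys()):
--         if dir_name != '.':
--             structure_lines.append(f"{dir_name}/")
--             for file in sorted(dirs[dir_name]):
--                 structure_lines.append(f"  {file}")
--         else:
--             for file in sorted(dirs[dir_name]):
--                 structure_lines.append(file)
--
--     return "\n".join(structure_lines)
-- ===== SOURCE B (Python) =====
-- def _split_entry(f):
--     parts = f.split('/')
--     if len(parts) > 1:
--         return '/'.join(parts[:-1]), parts[-1]
--     return '.', f
--
-- def _generate_simple_structure(files):
--     pairs = [_split_entry(f) for f in files]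
--     lines = []
--     for d in sorted({p[0] for p in pairs}):
--         names = sorted(b for x, b in pairs if x == d)
--         if d != '.':
--             lines.append(d + "/")
--             lines += ["  " + b for b in names]
--         else:
--             lines += names
--     return "\n".join(lines)
-- ===== Notes on version B (the rewrite author's own statement) =====
-- stated objective: simpler
-- what changed: A sorts the filenames first and grows a dict of per-directory lists it then re-sorts; B never sorts the filenames: it splits each name once into a (dir, base) pair, iterates over the sorted set of directory names and collects each directory's basenames with a filter comprehension.
import Mathlib
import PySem

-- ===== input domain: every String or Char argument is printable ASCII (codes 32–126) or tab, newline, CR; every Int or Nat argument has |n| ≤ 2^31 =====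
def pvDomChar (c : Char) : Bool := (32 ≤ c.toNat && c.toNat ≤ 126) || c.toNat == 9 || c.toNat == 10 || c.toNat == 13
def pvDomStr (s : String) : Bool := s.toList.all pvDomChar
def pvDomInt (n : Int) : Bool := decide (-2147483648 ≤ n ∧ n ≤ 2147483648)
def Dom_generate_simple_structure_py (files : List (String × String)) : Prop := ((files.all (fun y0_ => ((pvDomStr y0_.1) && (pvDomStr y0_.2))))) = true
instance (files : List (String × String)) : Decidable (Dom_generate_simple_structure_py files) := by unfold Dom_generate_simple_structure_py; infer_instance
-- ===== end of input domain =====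

-- B replaces A's sort-keys-then-grow-a-dict-of-lists grouping by a directory set plus a
-- per-directory filter (simpler decomposition, no speed claim); return values agree everywhere.

-- ===== PORT A =====
def generate_simple_structure_py (files : List (String × String)) : String :=
  -- for filename in sorted(files.keys()): group into dirs
  let dirs : PySem.Dict String (List String) :=
    (PySem.List.sorted ((PySem.Dict.ofList files).keys) (fun x => x) false).foldl
      (fun dirs filename =>
        let parts := (PySem.Str.split? filename "/").getD []   -- sep "/" ≠ "" so split? is some
        if parts.length > 1 then
          let dir_name := PySem.Str.join "/" (PySem.List.slice parts none (some (-1)))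
          let dirs := if dirs.contains dir_name then dirs else dirs.insert dir_name []
          -- dirs[dir_name].append(parts[-1])  (key present; append kept in place)
          dirs.modify dir_name [] (fun l => l ++ [PySem.List.pyGetD parts (-1) ""])
        else
          let dirs := if dirs.contains "." then dirs else dirs.insert "." []
          dirs.modify "." [] (fun l => l ++ [filename]))
      PySem.Dict.empty
  -- build structure
  let structure_lines : List String :=
    (PySem.List.sorted dirs.keys (fun x => x) false).foldl
      (fun acc dir_name =>
        if dir_name ≠ "." then
          let acc := acc ++ [dir_name ++ "/"]
          (PySem.List.sorted (dirs.getD dir_name []) (fun x => x) false).foldl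
            (fun acc file => acc ++ ["  " ++ file]) acc
        else
          (PySem.List.sorted (dirs.getD dir_name []) (fun x => x) false).foldl
            (fun acc file => acc ++ [file]) acc)
      []
  PySem.Str.join "\n" structure_lines

-- ===== PORT B =====
-- helper _split_entry of Source B
def pvSplitEntry (f : String) : String × String :=
  let parts := (PySem.Str.split? f "/").getD []   -- sep "/" ≠ "" so split? is some
  if parts.length > 1 then
    (PySem.Str.join "/" (PySem.List.slice parts none (some (-1))), PySem.List.pyGetD parts (-1) "")
  else (".", f)

def generate_simple_structure_py_alt (files : List (String × String)) : String :=
  let pairs := ((PySem.Dict.ofList files).keys).map pvSplitEntry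
  let lines : List String :=
    (PySem.List.sorted (PySem.Set.ofList (pairs.map (fun p => p.1))) (fun x => x) false).foldl
      (fun lines d =>
        let names := PySem.List.sorted ((pairs.filter (fun p => p.1 == d)).map (fun p => p.2)) (fun x => x) false
        if d ≠ "." then (lines ++ [d ++ "/"]) ++ names.map (fun b => "  " ++ b)
        else lines ++ names)
      []
  PySem.Str.join "\n" lines

-- ===== PRECONDITION & SPEC =====
def Spec_generate_simple_structure_py (files : List (String × String)) (out : String) : Prop := out = generate_simple_structure_py_alt files
instance (files : List (String × String)) (out : String) : Decidable (Spec_generate_simple_structure_py files out) := by unfold Spec_generate_simple_structure_py; infer_instance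

-- ===== CLAIM (what is proved, stated in full; the proofs are below) =====
def Claim_equal_generate_simple_structure_py : Prop := ∀ (files : List (String × String)), Dom_generate_simple_structure_py files → Spec_generate_simple_structure_py files (generate_simple_structure_py files)

-- ===== LEMMAS AND PROOFS =====

-- lookup of a freshly appended key
theorem pv_get?_mk_append (its : List (String × List String)) (k : String) (v : List String)
    (h : ∀ p ∈ its, p.1 ≠ k) :
    (PySem.Dict.mk (its ++ [(k, v)])).get? k = some v := by
  induction its with
  | nil => simp [PySem.Dict.get?_mk_cons]
  | cons p t ih =>
    rw [List.cons_append, PySem.Dict.get?_mk_cons]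
    have hp : ¬ (p.1 == k) = true := by
      simpa using h p (List.mem_cons_self)
    rw [if_neg hp]
    exact ih (fun q hq => h q (List.mem_cons_of_mem _ hq))

-- the conditional "ensure key then append" of A is a plain modify-append
theorem pv_ensure_modify (d : PySem.Dict String (List String)) (k : String) (b : String) :
    (if d.contains k then d else d.insert k []).modify k [] (fun l => l ++ [b])
      = d.modify k [] (fun l => l ++ [b]) := by
  cases hc : d.contains k
  · have hmem : ∀ p ∈ d.items, p.1 ≠ k := by
      intro p hp hpk
      have : d.contains k = true := by
        rw [PySem.Dict.contains_iff_mem_keys]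
        simp only [PySem.Dict.keys]
        exact hpk ▸ List.mem_map_of_mem hp
      simp [this] at hc
    have hget : (PySem.Dict.mk (d.items ++ [(k, ([] : List String))])).getD k [] = [] := by
      rw [PySem.Dict.getD_eq_get?_getD, pv_get?_mk_append d.items k [] hmem]
      rfl
    simp only [Bool.false_eq_true, if_false]
    apply PySem.Dict.ext
    simp only [PySem.Dict.modify, PySem.Dict.insert, hc, Bool.false_eq_true, if_false,
      PySem.Dict.contains_mk]
    have hcontains : (d.items ++ [(k, ([] : List String))]).any (fun p => p.1 == k) = true := by
      simp
    rw [if_pos hcontains]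
    simp only [List.map_append, hget]
    have hmap : ∀ its : List (String × List String), (∀ p ∈ its, p.1 ≠ k) →
        its.map (fun p => if p.1 == k then (k, [] ++ [b]) else p) = its := by
      intro its hits
      refine (List.map_congr_left ?_).trans (List.map_id _)
      intro p hp
      simp [hits p hp]
    rw [hmap d.items hmem]
    simp [PySem.Dict.getD_of_not_contains, hc]
  · simp

-- A's grouping step is "append (pvSplitEntry fn).2 to bucket (pvSplitEntry fn).1"
theorem pv_stepA_eq :
    (fun (dirs : PySem.Dict String (List String)) (filename : String) =>
        let parts := (PySem.Str.split? filename "/").getD []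
        if parts.length > 1 then
          let dir_name := PySem.Str.join "/" (PySem.List.slice parts none (some (-1)))
          let dirs := if dirs.contains dir_name then dirs else dirs.insert dir_name []
          dirs.modify dir_name [] (fun l => l ++ [PySem.List.pyGetD parts (-1) ""])
        else
          let dirs := if dirs.contains "." then dirs else dirs.insert "." []
          dirs.modify "." [] (fun l => l ++ [filename]))
      = fun dirs fn => dirs.modify (pvSplitEntry fn).1 [] (fun l => l ++ [(pvSplitEntry fn).2]) := by
  funext dirs fn
  simp only [pvSplitEntry]
  by_cases h : ((PySem.Str.split? fn "/").getD []).length > 1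
  · simp only [h, if_true, pv_ensure_modify]
  · simp only [h, if_false, pv_ensure_modify]

theorem pv_main (K : List String) :
    (let dirs : PySem.Dict String (List String) :=
      (PySem.List.sorted K (fun x => x) false).foldl
        (fun dirs fn => dirs.modify (pvSplitEntry fn).1 [] (fun l => l ++ [(pvSplitEntry fn).2]))
        PySem.Dict.empty
     (PySem.List.sorted dirs.keys (fun x => x) false).foldl
      (fun acc dir_name =>
        if dir_name ≠ "." then
          let acc := acc ++ [dir_name ++ "/"]
          (PySem.List.sorted (dirs.getD dir_name []) (fun x => x) false).foldl
            (fun acc file => acc ++ ["  " ++ file]) acc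
        else
          (PySem.List.sorted (dirs.getD dir_name []) (fun x => x) false).foldl
            (fun acc file => acc ++ [file]) acc)
      [])
    = (let pairs := K.map pvSplitEntry
       (PySem.List.sorted (PySem.Set.ofList (pairs.map (fun p => p.1))) (fun x => x) false).foldl
        (fun lines d =>
          let names := PySem.List.sorted ((pairs.filter (fun p => p.1 == d)).map (fun p => p.2)) (fun x => x) false
          if d ≠ "." then (lines ++ [d ++ "/"]) ++ names.map (fun b => "  " ++ b)
          else lines ++ names)
        []) := by
  have hKperm : (PySem.List.sorted K (fun x => x) false).Perm K :=
    PySem.List.sorted_perm K (fun x => x) false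
  have hPperm : ((PySem.List.sorted K (fun x => x) false).map pvSplitEntry).Perm (K.map pvSplitEntry) :=
    hKperm.map pvSplitEntry
  have hfold : (PySem.List.sorted K (fun x => x) false).foldl
        (fun dirs fn => dirs.modify (pvSplitEntry fn).1 [] (fun l => l ++ [(pvSplitEntry fn).2]))
        PySem.Dict.empty
      = ((PySem.List.sorted K (fun x => x) false).map pvSplitEntry).foldl
        (fun d p => d.modify p.1 [] (fun l => l ++ [p.2])) PySem.Dict.empty := by
    rw [List.foldl_map]
  have hkeys : (((PySem.List.sorted K (fun x => x) false).map pvSplitEntry).foldl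
        (fun d p => d.modify p.1 [] (fun l => l ++ [p.2])) PySem.Dict.empty).keys
      = PySem.Set.ofList (((PySem.List.sorted K (fun x => x) false).map pvSplitEntry).map (fun p => p.1)) := by
    rw [PySem.Dict.keys_foldl_modify_key]
    rw [PySem.Dict.keys_empty]
    rfl
  have hd : ∀ c, (((PySem.List.sorted K (fun x => x) false).map pvSplitEntry).foldl
        (fun d p => d.modify p.1 [] (fun l => l ++ [p.2])) PySem.Dict.empty).getD c []
      = (((PySem.List.sorted K (fun x => x) false).map pvSplitEntry).filter
          (fun p => p.1 == c)).map (fun p => p.2) := by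
    intro c
    rw [PySem.Dict.getD_foldl_modify_append]
    simp [PySem.Dict.getD_empty]
  have hS : PySem.List.sorted
        (PySem.Set.ofList (((PySem.List.sorted K (fun x => x) false).map pvSplitEntry).map (fun p => p.1)))
        (fun x => x) false
      = PySem.List.sorted (PySem.Set.ofList ((K.map pvSplitEntry).map (fun p => p.1))) (fun x => x) false := by
    apply PySem.List.sorted_eq_sorted_of_perm _ _ _ (fun a b h => h)
    refine (List.perm_ext_iff_of_nodup (PySem.Set.nodup_ofList _) (PySem.Set.nodup_ofList _)).mpr ?_
    intro a
    rw [PySem.Set.mem_ofList, PySem.Set.mem_ofList, (hPperm.map (fun p => p.1)).mem_iff]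
  have hbucket : ∀ dn, PySem.List.sorted
        ((((PySem.List.sorted K (fun x => x) false).map pvSplitEntry).filter
          (fun p => p.1 == dn)).map (fun p => p.2)) (fun x => x) false
      = PySem.List.sorted (((K.map pvSplitEntry).filter (fun p => p.1 == dn)).map (fun p => p.2))
        (fun x => x) false := by
    intro dn
    exact PySem.List.sorted_eq_sorted_of_perm _ _ _ (fun a b h => h)
      ((hPperm.filter (fun p => p.1 == dn)).map (fun p => p.2))
  simp only [hfold, hkeys, hd, hS]
  apply PySem.List.foldl_congr_mem
  intro acc dn hdn
  simp only [PySem.List.foldl_append_singleton_eq_map, hbucket dn]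
  split_ifs <;> simp [List.map_id']

-- ===== VERDICT (by name: the statement is the Claim_ definition above) =====
theorem generate_simple_structure_py_spec : Claim_equal_generate_simple_structure_py := by
  intro files _
  unfold Spec_generate_simple_structure_py generate_simple_structure_py generate_simple_structure_py_alt
  rw [pv_stepA_eq]
  exact congrArg (PySem.Str.join "\n") (pv_main ((PySem.Dict.ofList files).keys))
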